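-- pv_equiv track=rewrite | github.com/vskarleas/INF101-S1-Python | TP Exercises/TP 7/abdel_exercise.py | derniere_consone2
-- ===== SOURCE A (Python) =====
-- def derniere_consone2(mot):
--     liste = list(mot)
--     index = []
--     consonne = []
--     voyelle = ["a", "e", "i", "o", "u"]
--     for i in range(len(liste)):
--         if liste[i] not in voyelle:
--             index.append(i)
--             consonne.append(liste[i])
--
--     return index[-1], consonne[-1]
-- ===== SOURCE B (Python) =====
-- def derniere_consone2(mot):
--     for i in range(len(mot) - 1, -1, -1):
--         if mot[i] not in ["a", "e", "i", "o", "u"]: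
--             return i, mot[i]
--     raise IndexError("no consonant")
-- ===== Notes on version B (the rewrite author's own statement) =====
-- stated objective: faster
-- what changed: B walks backward from the end and returns the first non-vowel immediately, building no index/consonne lists; A builds both full lists in a forward pass and then takes their last elements.
import Mathlib
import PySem

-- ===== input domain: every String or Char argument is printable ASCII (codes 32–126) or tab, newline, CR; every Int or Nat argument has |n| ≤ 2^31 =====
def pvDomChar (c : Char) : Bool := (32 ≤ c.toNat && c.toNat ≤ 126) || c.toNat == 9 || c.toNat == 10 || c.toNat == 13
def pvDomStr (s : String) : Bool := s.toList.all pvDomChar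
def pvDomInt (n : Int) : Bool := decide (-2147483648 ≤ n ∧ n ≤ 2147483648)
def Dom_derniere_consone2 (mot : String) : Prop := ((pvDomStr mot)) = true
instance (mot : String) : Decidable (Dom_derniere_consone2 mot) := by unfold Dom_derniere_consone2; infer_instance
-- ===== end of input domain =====

-- B scans backward and returns the first non-vowel without building the index/consonne lists (simpler, early exit).

-- ===== PORT A =====
-- A: forward pass collecting the indices and characters of every non-vowel, then
-- index[-1], consonne[-1] (both raise IndexError when no consonant exists — outside Pre_;
-- the `.getD` defaults below are never reached under Pre_).
def derniere_consone2 (mot : String) : Int × String :=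
  let liste := mot.toList
  let acc := (PySem.List.enumerate liste).foldl
      (fun (st : List Int × List Char) p =>
        if p.2 ∈ ['a', 'e', 'i', 'o', 'u'] then st
        else (st.1 ++ [p.1], st.2 ++ [p.2]))
      ([], [])
  ((acc.1.getLast?).getD 0, String.ofList [((acc.2.getLast?).getD ' ')])

-- ===== PORT B =====
-- B: walk i from len-1 down to 0, return at the first non-vowel; the empty-suffix case
-- corresponds to B's `raise IndexError` (outside Pre_).
def altGo (l : List Char) (i : Int) : Int × String :=
  match l with
  | [] => (0, " ")
  | c :: rest =>
    if c ∈ ['a', 'e', 'i', 'o', 'u'] then altGo rest (i - 1)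
    else (i, String.ofList [c])

def derniere_consone2_alt (mot : String) : Int × String :=
  altGo mot.toList.reverse ((mot.toList.length : Int) - 1)

-- ===== PRECONDITION & SPEC =====
-- Pre_ excludes exactly the strings with no consonant (all chars ['a', 'e', 'i', 'o', 'u'], incl. empty),
-- on which both A and B raise IndexError.
def Pre_derniere_consone2 (mot : String) : Prop :=
  mot.toList.any (fun c => c ∉ ['a', 'e', 'i', 'o', 'u']) = true
instance (mot : String) : Decidable (Pre_derniere_consone2 mot) := by
  unfold Pre_derniere_consone2; infer_instance
def pvWitness_derniere_consone2 : String := "ab"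
def Spec_derniere_consone2 (mot : String) (out : Int × String) : Prop := out = derniere_consone2_alt mot
instance (mot : String) (out : Int × String) : Decidable (Spec_derniere_consone2 mot out) := by unfold Spec_derniere_consone2; infer_instance

-- ===== CLAIM (what is proved, stated in full; the proofs are below) =====
def Claim_equal_derniere_consone2 : Prop := ∀ (mot : String), Dom_derniere_consone2 mot → Pre_derniere_consone2 mot → Spec_derniere_consone2 mot (derniere_consone2 mot)

-- ===== LEMMAS AND PROOFS =====

-- A's foldl only ever appends to its accumulators.
theorem foldA_append (ps : List (Int × Char)) (a : List Int) (b : List Char) :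
    ps.foldl
      (fun (st : List Int × List Char) p =>
        if p.2 ∈ ['a', 'e', 'i', 'o', 'u'] then st else (st.1 ++ [p.1], st.2 ++ [p.2]))
      (a, b)
    = (a ++ (ps.filter (fun p => p.2 ∉ ['a', 'e', 'i', 'o', 'u'])).map Prod.fst,
       b ++ (ps.filter (fun p => p.2 ∉ ['a', 'e', 'i', 'o', 'u'])).map Prod.snd) := by
  induction ps generalizing a b with
  | nil => simp
  | cons p ps ih =>
    by_cases h : p.2 ∈ ['a', 'e', 'i', 'o', 'u']
    · rw [List.foldl_cons, if_pos h, ih, List.filter_cons_of_neg (by simp [h])]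
    · rw [List.foldl_cons, if_neg h, ih, List.filter_cons_of_pos (by simp [h])]
      simp

-- Core: on a string containing a consonant, the last filtered pair of the forward pass
-- is exactly what the backward scan returns.
theorem core (l : List Char) (h : ∃ c ∈ l, c ∉ ['a', 'e', 'i', 'o', 'u']) :
    ∃ n c0,
      ((PySem.List.enumerate l).filter (fun p => p.2 ∉ ['a', 'e', 'i', 'o', 'u'])).getLast? = some (n, c0) ∧
      altGo l.reverse ((l.length : Int) - 1) = (n, String.ofList [c0]) := by
  induction l using List.reverseRecOn with
  | nil => simp at h
  | append_singleton l c ih =>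
    by_cases hc : c ∈ ['a', 'e', 'i', 'o', 'u']
    · have hl : ∃ c ∈ l, c ∉ ['a', 'e', 'i', 'o', 'u'] := by
        rcases h with ⟨d, hd, hdv⟩
        rcases List.mem_append.1 hd with h1 | h1
        · exact ⟨d, h1, hdv⟩
        · simp at h1; subst h1; exact absurd hc hdv
      rcases ih hl with ⟨n, c0, h1, h2⟩
      have hfc : List.filter (fun p => decide (p.2 ∉ ['a', 'e', 'i', 'o', 'u']))
          (PySem.List.enumerate [c] (0 + (l.length : Int))) = [] := by
        simp [PySem.List.enumerate] at hc ⊢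
        tauto
      refine ⟨n, c0, ?_, ?_⟩
      · rw [PySem.List.enumerate_append, List.filter_append, hfc, List.append_nil]
        exact h1
      · have hrev : (l ++ [c]).reverse = c :: l.reverse := by simp
        have harith : (((l ++ [c]).length : Int)) - 1 - 1 = (l.length : Int) - 1 := by
          simp
        rw [hrev]
        show (if c ∈ ['a', 'e', 'i', 'o', 'u'] then
                altGo l.reverse (((l ++ [c]).length : Int) - 1 - 1)
              else (((l ++ [c]).length : Int) - 1, String.ofList [c])) = (n, String.ofList [c0])
        rw [if_pos (show c ∈ ['a', 'e', 'i', 'o', 'u'] from hc), harith]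
        exact h2
    · refine ⟨(l.length : Int), c, ?_, ?_⟩
      · have hfc2 : List.filter (fun p => decide (p.2 ∉ ['a', 'e', 'i', 'o', 'u']))
            (PySem.List.enumerate [c] (0 + (l.length : Int))) = [(0 + (l.length : Int), c)] := by
          simp [PySem.List.enumerate] at hc ⊢
          tauto
        rw [PySem.List.enumerate_append, List.filter_append, hfc2]
        simp
      · have hrev : (l ++ [c]).reverse = c :: l.reverse := by simp
        have harith : (((l ++ [c]).length : Int)) - 1 = (l.length : Int) := by
          simp
        rw [hrev]
        show (if c ∈ ['a', 'e', 'i', 'o', 'u'] then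
                altGo l.reverse (((l ++ [c]).length : Int) - 1 - 1)
              else (((l ++ [c]).length : Int) - 1, String.ofList [c])) = ((l.length : Int), String.ofList [c])
        rw [if_neg (show c ∉ ['a', 'e', 'i', 'o', 'u'] from hc), harith]

theorem getLast?_map {α β : Type} (f : α → β) (l : List α) :
    (l.map f).getLast? = l.getLast?.map f := by
  induction l using List.reverseRecOn with
  | nil => simp
  | append_singleton l a ih => simp

-- ===== VERDICT (by name: the statement is the Claim_ definition above) =====
theorem derniere_consone2_spec : Claim_equal_derniere_consone2 := by
  intro mot _ hpre
  have hpre' : ∃ c ∈ mot.toList, c ∉ ['a', 'e', 'i', 'o', 'u'] := by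
    unfold Pre_derniere_consone2 at hpre
    simpa using hpre
  rcases core mot.toList hpre' with ⟨n, c0, h1, h2⟩
  have hf := foldA_append (PySem.List.enumerate mot.toList) [] []
  unfold Spec_derniere_consone2 derniere_consone2 derniere_consone2_alt
  dsimp only
  rw [hf, List.nil_append, List.nil_append, getLast?_map, getLast?_map]
  rw [h1]
  simp only [Option.map_some, Option.getD_some]
  exact h2.symm
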